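-- pv_equiv track=rewrite | github.com/idaholab/raven | ravenframework/CodeInterfaceClasses/PHISICS/PhisicsInterface.py | distributeVariablesToParsers
-- ===== SOURCE A (Python) =====
-- def distributeVariablesToParsers(perturbedVars):
--   """
--     Transforms a dictionary into dictionary of dictionaries. This dictionary renders easy the distribution
--     of the variables to their corresponding parser. For example, if the two variables are the following:
--     {'FY|FAST|PU241|SE78':1.0, 'DECAY|BETA|U235':2.0}, the output dict will become:
--     {'FY':{'FY|FAST|PU241|SE78':1.0}, 'DECAY':{'DECAY|BETA|U235':2.0}}
--     @ In, perturbedVars, dictionary, dictionary of the perturbed variables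
--     @ Out, distributedPerturbedVars, dictionary of dictionaries containing the perturbed variables
--   """
--   distributedPerturbedVars = {}
--   pertType = []
--   for i in perturbedVars.keys():
--     # teach what are the type of perturbation (decay FY etc...)
--     if "|" in i:
--       pertType.append(i.split('|')[0])
--     else:
--       pertType.append("generic")
--   for i in range(0, len(pertType)):
--     # declare all the dictionaries according the different type of pert
--     distributedPerturbedVars[pertType[i]] = {}
--   for key, value in perturbedVars.items():
--     # populate the dictionaries
--     splittedKeywords = key.split('|') if '|' in key else ["generic"]
--     for j in range(0, len(pertType)):
--       if splittedKeywords[0] == pertType[j]: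
--         distributedPerturbedVars[pertType[j]][key] = value
--   return distributedPerturbedVars
-- ===== SOURCE B (Python) =====
-- def distributeVariablesToParsers(perturbedVars):
--   distributedPerturbedVars = {}
--   for key, value in perturbedVars.items():
--     prefix = key.split('|')[0] if '|' in key else 'generic'
--     distributedPerturbedVars.setdefault(prefix, {})[key] = value
--   return distributedPerturbedVars
-- ===== Notes on version B (the rewrite author's own statement) =====
-- stated objective: simpler
-- what changed: A's three passes (collect all prefixes, pre-declare an empty sub-dict per prefix, then for every item rescan the whole prefix list for matches) are replaced by a single pass that computes each key's prefix once and files the item with dict.setdefault, eliminating the quadratic inner scan.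
import Mathlib
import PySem

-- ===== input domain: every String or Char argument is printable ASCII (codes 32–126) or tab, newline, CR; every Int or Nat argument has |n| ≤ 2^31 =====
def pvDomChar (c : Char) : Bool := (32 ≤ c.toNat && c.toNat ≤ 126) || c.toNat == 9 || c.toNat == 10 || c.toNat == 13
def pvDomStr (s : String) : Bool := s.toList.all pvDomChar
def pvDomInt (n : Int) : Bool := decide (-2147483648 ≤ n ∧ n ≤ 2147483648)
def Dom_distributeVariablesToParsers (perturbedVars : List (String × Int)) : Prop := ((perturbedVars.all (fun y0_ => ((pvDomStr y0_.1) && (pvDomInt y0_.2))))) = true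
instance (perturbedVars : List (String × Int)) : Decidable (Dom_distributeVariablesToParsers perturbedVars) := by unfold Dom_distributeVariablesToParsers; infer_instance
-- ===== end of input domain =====

-- B replaces A's three passes (collect prefixes, pre-declare empty sub-dicts, then for each item scan the
-- whole prefix list again) by a single pass that files each item under its prefix with dict.setdefault.

-- ===== PORT A =====
-- A's first loop: collect the perturbation type (prefix before '|', or "generic") of every key.
def pvA_pertType (perturbedVars : List (String × Int)) : List String :=
  perturbedVars.foldl (fun acc kv =>
    acc ++ [if PySem.Str.isIn "|" kv.1 then ((PySem.Str.split? kv.1 "|").getD []).headD "" else "generic"]) []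

-- A's second loop: declare an empty sub-dict for each perturbation type.
def pvA_declare (pertType : List String) : PySem.Dict String (PySem.Dict String Int) :=
  pertType.foldl (fun d p => d.insert p PySem.Dict.empty) PySem.Dict.empty

-- A's third loop: populate; inner loop scans pertType and, on a match, sets d[p][key] = value.
-- 'splittedKeywords[0]' is '.headD ""' (split? with a nonempty separator always returns a nonempty list);
-- 'd[p][key] = value' is Dict.modify at p (p is always present: it was inserted by the second loop).
def pvA_populate (pertType : List String) (perturbedVars : List (String × Int))
    (d : PySem.Dict String (PySem.Dict String Int)) : PySem.Dict String (PySem.Dict String Int) :=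
  perturbedVars.foldl (fun d kv =>
    let splittedKeywords := if PySem.Str.isIn "|" kv.1 then (PySem.Str.split? kv.1 "|").getD [] else ["generic"]
    pertType.foldl (fun d p =>
      if splittedKeywords.headD "" == p then
        d.modify p PySem.Dict.empty (fun sub => sub.insert kv.1 kv.2)
      else d) d) d

def distributeVariablesToParsers (perturbedVars : List (String × Int)) : List (String × List (String × Int)) :=
  let pertType := pvA_pertType perturbedVars
  (pvA_populate pertType perturbedVars (pvA_declare pertType)).items.map (fun pr => (pr.1, pr.2.items))

-- ===== PORT B =====
-- B's single loop: out.setdefault(prefix, {})[key] = value, modelled as reading the current sub-dict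
-- (empty when the prefix is new — setdefault appends the new prefix at the end, exactly as Dict.insert does).
def pvB_fold (perturbedVars : List (String × Int)) : PySem.Dict String (PySem.Dict String Int) :=
  perturbedVars.foldl (fun d kv =>
    let p := if PySem.Str.isIn "|" kv.1 then ((PySem.Str.split? kv.1 "|").getD []).headD "" else "generic"
    d.insert p (((d.get? p).getD PySem.Dict.empty).insert kv.1 kv.2)) PySem.Dict.empty

def distributeVariablesToParsers_alt (perturbedVars : List (String × Int)) : List (String × List (String × Int)) :=
  (pvB_fold perturbedVars).items.map (fun pr => (pr.1, pr.2.items))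

-- ===== PRECONDITION & SPEC =====
def Spec_distributeVariablesToParsers (perturbedVars : List (String × Int)) (out : List (String × List (String × Int))) : Prop := out = distributeVariablesToParsers_alt perturbedVars
instance (perturbedVars : List (String × Int)) (out : List (String × List (String × Int))) : Decidable (Spec_distributeVariablesToParsers perturbedVars out) := by unfold Spec_distributeVariablesToParsers; infer_instance

-- ===== CLAIM (what is proved, stated in full; the proofs are below) =====
def Claim_equal_distributeVariablesToParsers : Prop := ∀ (perturbedVars : List (String × Int)), Dom_distributeVariablesToParsers perturbedVars → Spec_distributeVariablesToParsers perturbedVars (distributeVariablesToParsers perturbedVars)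

-- ===== LEMMAS AND PROOFS =====

-- the prefix both programs compute for a key
def pfx (k : String) : String :=
  if PySem.Str.isIn "|" k then ((PySem.Str.split? k "|").getD []).headD "" else "generic"

theorem pertType_eq_map (pv : List (String × Int)) :
    pvA_pertType pv = pv.map (fun kv => pfx kv.1) := by
  simp only [pvA_pertType, pfx]
  exact PySem.List.foldl_append_singleton_eq_map _ pv []

theorem getD_declare (q : String) :
    ∀ (pt : List String) (d : PySem.Dict String (PySem.Dict String Int)),
      ((pt.foldl (fun d p => d.insert p PySem.Dict.empty) d).getD q PySem.Dict.empty)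
        = if q ∈ pt then PySem.Dict.empty else d.getD q PySem.Dict.empty := by
  intro pt
  induction pt with
  | nil => intro d; simp
  | cons p pt ih =>
    intro d
    simp only [List.foldl_cons, ih, PySem.Dict.getD_insert, List.mem_cons]
    by_cases hq : q = p <;> by_cases hm : q ∈ pt <;> simp [hq, hm]

theorem getD_inner (s0 p k : String) (v : Int) :
    ∀ (pt : List String) (d : PySem.Dict String (PySem.Dict String Int)),
      ((pt.foldl (fun d q =>
          if s0 == q then d.modify q PySem.Dict.empty (fun sub => sub.insert k v) else d) d).getD
        p PySem.Dict.empty)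
      = if s0 ∈ pt ∧ p = s0 then (d.getD p PySem.Dict.empty).insert k v
        else d.getD p PySem.Dict.empty := by
  intro pt
  induction pt with
  | nil => intro d; simp
  | cons q pt ih =>
    intro d
    rw [List.foldl_cons]
    by_cases hq : s0 = q
    · subst hq
      rw [if_pos (by simp), ih]
      by_cases hp : p = s0
      · subst hp
        by_cases hm : p ∈ pt <;>
          simp [hm, PySem.Dict.insert_insert_self]
      · by_cases hm : s0 ∈ pt <;> simp [hm, hp, PySem.Dict.getD_modify]
    · rw [if_neg (by simp [hq]), ih]
      by_cases hm : s0 ∈ pt ∧ p = s0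
      · rw [if_pos hm, if_pos ⟨List.mem_cons_of_mem _ hm.1, hm.2⟩]
      · rw [if_neg hm, if_neg (by
          rintro ⟨h1, h2⟩
          rcases List.mem_cons.mp h1 with h | h
          · exact hq h
          · exact hm ⟨h, h2⟩)]

theorem getD_populate (p : String) (pt : List String) :
    ∀ (L : List (String × Int)) (d : PySem.Dict String (PySem.Dict String Int)),
      (∀ kv ∈ L, pfx kv.1 ∈ pt) →
      ((pvA_populate pt L d).getD p PySem.Dict.empty)
        = (L.filter (fun kv => pfx kv.1 == p)).foldl
            (fun sub kv => sub.insert kv.1 kv.2) (d.getD p PySem.Dict.empty) := by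
  intro L
  induction L with
  | nil => intro d _; simp [pvA_populate]
  | cons kv L ih =>
    intro d hmem
    have hs0 : (if PySem.Str.isIn "|" kv.1 then (PySem.Str.split? kv.1 "|").getD [] else ["generic"]).headD ""
        = pfx kv.1 := by
      unfold pfx
      by_cases h : PySem.Str.isIn "|" kv.1
      · rw [if_pos h, if_pos h]
      · rw [if_neg h, if_neg h]; rfl
    have hstep : pvA_populate pt (kv :: L) d = pvA_populate pt L
        (pt.foldl (fun d q =>
          if pfx kv.1 == q then d.modify q PySem.Dict.empty (fun sub => sub.insert kv.1 kv.2) else d) d) := by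
      simp only [pvA_populate, List.foldl_cons, hs0]
    rw [hstep, ih _ (fun kv' h => hmem kv' (List.mem_cons_of_mem _ h)), getD_inner]
    rw [List.filter_cons]
    have hin : pfx kv.1 ∈ pt := hmem kv List.mem_cons_self
    by_cases hp : pfx kv.1 = p
    · subst hp
      simp [hin]
    · rw [if_neg (show ¬(pfx kv.1 ∈ pt ∧ p = pfx kv.1) from fun h => hp h.2.symm),
          if_neg (show ¬((pfx kv.1 == p) = true) from by simpa using hp)]

theorem getD_Bfold (p : String) :
    ∀ (L : List (String × Int)) (d : PySem.Dict String (PySem.Dict String Int)),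
      ((L.foldl (fun d kv =>
          d.insert (pfx kv.1) (((d.get? (pfx kv.1)).getD PySem.Dict.empty).insert kv.1 kv.2)) d).getD
        p PySem.Dict.empty)
      = (L.filter (fun kv => pfx kv.1 == p)).foldl
          (fun sub kv => sub.insert kv.1 kv.2) (d.getD p PySem.Dict.empty) := by
  intro L
  induction L with
  | nil => intro d; simp
  | cons kv L ih =>
    intro d
    rw [List.foldl_cons, ih, List.filter_cons, ← PySem.Dict.getD_eq_get?_getD,
      PySem.Dict.getD_insert]
    by_cases hp : pfx kv.1 = p
    · subst hp
      rw [if_pos rfl, if_pos BEq.rfl, List.foldl_cons]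
    · rw [if_neg (fun h => hp h.symm), if_neg (by simp [hp])]

theorem keys_inner (s0 k : String) (v : Int) :
    ∀ (pt : List String) (d : PySem.Dict String (PySem.Dict String Int)),
      s0 ∈ d.keys →
      ((pt.foldl (fun d q =>
          if s0 == q then d.modify q PySem.Dict.empty (fun sub => sub.insert k v) else d) d).keys)
        = d.keys := by
  intro pt
  induction pt with
  | nil => intro d _; simp
  | cons q pt ih =>
    intro d hd
    rw [List.foldl_cons]
    by_cases hq : s0 = q
    · subst hq
      have hc : d.contains s0 = true := (PySem.Dict.contains_iff_mem_keys d s0).mpr hd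
      have hk : (d.modify s0 PySem.Dict.empty (fun sub => sub.insert k v)).keys = d.keys := by
        rw [PySem.Dict.keys_modify, PySem.Dict.keys_insert_of_contains _ _ hc]
      rw [if_pos BEq.rfl, ih _ (by rw [hk]; exact hd), hk]
    · rw [if_neg (by simp [hq])]
      exact ih d hd

theorem keys_populate (pt : List String) :
    ∀ (L : List (String × Int)) (d : PySem.Dict String (PySem.Dict String Int)),
      (∀ kv ∈ L, pfx kv.1 ∈ d.keys) →
      (pvA_populate pt L d).keys = d.keys := by
  intro L
  induction L with
  | nil => intro d _; simp [pvA_populate]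
  | cons kv L ih =>
    intro d hmem
    have hs0 : (if PySem.Str.isIn "|" kv.1 then (PySem.Str.split? kv.1 "|").getD [] else ["generic"]).headD ""
        = pfx kv.1 := by
      unfold pfx
      by_cases h : PySem.Str.isIn "|" kv.1
      · rw [if_pos h, if_pos h]
      · rw [if_neg h, if_neg h]; rfl
    simp only [pvA_populate, List.foldl_cons] at *
    have hk := keys_inner (pfx kv.1) kv.1 kv.2 pt d (hmem kv (by simp))
    rw [hs0]
    rw [ih _ (fun kv' hk' => by rw [hk]; exact hmem kv' (by simp [hk'])), hk]

theorem keys_declare (pt : List String) :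
    (pvA_declare pt).keys = PySem.Set.ofList pt := by
  have := PySem.Dict.keys_foldl_insert_key pt (fun p => p)
    (fun _ _ => (PySem.Dict.empty : PySem.Dict String Int)) PySem.Dict.empty
  simpa [pvA_declare, PySem.Set.update] using this

theorem keys_Bfold (pv : List (String × Int)) :
    (pvB_fold pv).keys = PySem.Set.ofList (pv.map (fun kv => pfx kv.1)) := by
  have := PySem.Dict.keys_foldl_insert_key pv (fun kv => pfx kv.1)
    (fun d kv => ((d.get? (pfx kv.1)).getD PySem.Dict.empty).insert kv.1 kv.2) PySem.Dict.empty
  simpa [pvB_fold, pfx, PySem.Set.update] using this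

theorem nodup_keys_declare (pt : List String) : (pvA_declare pt).keys.Nodup := by
  exact PySem.Dict.nodup_keys_foldl_insert_key pt (fun p => p) _ _ PySem.Dict.nodup_keys_empty

theorem nodup_keys_Bfold (pv : List (String × Int)) : (pvB_fold pv).keys.Nodup := by
  exact PySem.Dict.nodup_keys_foldl_insert_key pv (fun kv => pfx kv.1)
    (fun d kv => ((d.get? (pfx kv.1)).getD PySem.Dict.empty).insert kv.1 kv.2) PySem.Dict.empty
    PySem.Dict.nodup_keys_empty

-- ===== VERDICT (by name: the statement is the Claim_ definition above) =====
theorem distributeVariablesToParsers_spec : Claim_equal_distributeVariablesToParsers := by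
  intro pv _
  unfold Spec_distributeVariablesToParsers
  have hA : distributeVariablesToParsers pv
      = (pvA_populate (pvA_pertType pv) pv (pvA_declare (pvA_pertType pv))).items.map
          (fun pr => (pr.1, pr.2.items)) := rfl
  have hAlt : distributeVariablesToParsers_alt pv
      = (pvB_fold pv).items.map (fun pr => (pr.1, pr.2.items)) := rfl
  rw [hA, hAlt]
  have hB : pvB_fold pv = pv.foldl (fun d kv =>
      d.insert (pfx kv.1) (((d.get? (pfx kv.1)).getD PySem.Dict.empty).insert kv.1 kv.2))
      PySem.Dict.empty := by
    simp only [pvB_fold, pfx]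
  have hmem : ∀ kv ∈ pv, pfx kv.1 ∈ pvA_pertType pv := by
    intro kv hkv
    rw [pertType_eq_map]
    exact List.mem_map.mpr ⟨kv, hkv, rfl⟩
  have hmemK : ∀ kv ∈ pv, pfx kv.1 ∈ (pvA_declare (pvA_pertType pv)).keys := by
    intro kv hkv
    rw [keys_declare]
    exact (PySem.Set.mem_ofList _ _).mpr (hmem kv hkv)
  have hkeysA : (pvA_populate (pvA_pertType pv) pv (pvA_declare (pvA_pertType pv))).keys
      = PySem.Set.ofList (pv.map (fun kv => pfx kv.1)) := by
    rw [keys_populate _ _ _ hmemK, keys_declare, pertType_eq_map]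
  have hkeys : (pvA_populate (pvA_pertType pv) pv (pvA_declare (pvA_pertType pv))).keys
      = (pvB_fold pv).keys := by rw [hkeysA, keys_Bfold]
  have hnodupA : (pvA_populate (pvA_pertType pv) pv (pvA_declare (pvA_pertType pv))).keys.Nodup := by
    rw [keys_populate _ _ _ hmemK]; exact nodup_keys_declare _
  have hgetD : ∀ p, (pvA_populate (pvA_pertType pv) pv (pvA_declare (pvA_pertType pv))).getD p PySem.Dict.empty
      = (pvB_fold pv).getD p PySem.Dict.empty := by
    intro p
    rw [getD_populate p _ pv _ hmem, hB, getD_Bfold]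
    congr 1
    have := getD_declare p (pvA_pertType pv) PySem.Dict.empty
    simp only [pvA_declare, this, PySem.Dict.getD_empty]
    split <;> rfl
  rw [PySem.Dict.items_eq_map_keys _ hnodupA PySem.Dict.empty,
      PySem.Dict.items_eq_map_keys _ (nodup_keys_Bfold pv) PySem.Dict.empty, hkeys]
  congr 1
  exact List.map_congr_left (fun p _ => by rw [hgetD p])
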